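-- pv_equiv track=rewrite | github.com/adamwong246/testeranto | src/server/runtimes/python/pitono.py | strip_imports
-- ===== SOURCE A (Python) =====
-- def strip_imports(content: str) -> str:
--     """Remove import statements from Python code."""
--     lines = content.split('\n')
--     result_lines = []
--     in_multiline_string = False
--     multiline_delimiter = None
--
--     for line in lines:
--         # Handle multiline strings
--         stripped_line = line.strip()
--         if not in_multiline_string:
--             # Check for start of multiline string
--             if stripped_line.startswith('"""') or stripped_line.startswith("'''"):
--                 # Check if it's a single line or multiline
--                 if stripped_line.count('"""') == 1 or stripped_line.count("'''") == 1:
--                     in_multiline_string = True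
--                     multiline_delimiter = stripped_line[:3]
--                 result_lines.append(line)
--                 continue
--             # Check for import statements
--             elif stripped_line.startswith('import ') or stripped_line.startswith('from '):
--                 # Skip this line
--                 continue
--             else:
--                 result_lines.append(line)
--         else:
--             # Inside a multiline string
--             result_lines.append(line)
--             # Check for end of multiline string
--             if multiline_delimiter in stripped_line:
--                 # Count occurrences to handle cases where delimiter appears in the string
--                 if stripped_line.count(multiline_delimiter) % 2 == 1:
--                     in_multiline_string = False
--                     multiline_delimiter = None
--
--     return '\n'.join(result_lines)
-- ===== SOURCE B (Python) =====
-- def strip_imports(content: str) -> str: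
--     """Remove import statements from Python code (two-pass: mark, then filter)."""
--     lines = content.split('\n')
--     # Pass 1: flag each line with whether it lies inside a multiline string
--     # (the opening line itself is flagged False).
--     inside = []
--     delim = None  # None = not inside; otherwise the active triple-quote delimiter
--     for line in lines:
--         inside.append(delim is not None)
--         s = line.strip()
--         if delim is None:
--             if s.startswith('"""') or s.startswith("'''"):
--                 if s.count('"""') == 1 or s.count("'''") == 1:
--                     delim = s[:3]
--         else:
--             if delim in s and s.count(delim) % 2 == 1:
--                 delim = None
--     # Pass 2: keep flagged lines unconditionally; otherwise drop import/from lines.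
--     kept = [ln for ln, flag in zip(lines, inside)
--             if flag or not (ln.strip().startswith('import ') or ln.strip().startswith('from '))]
--     return '\n'.join(kept)
-- ===== Notes on version B (the rewrite author's own statement) =====
-- stated objective: alternative
-- what changed: A filters lines in one pass while updating the multiline-string state; B decomposes this into two passes: a first pass that only runs the state machine to flag which lines are inside a multiline string, and a second pass that filters import/from lines among the unflagged ones.
import Mathlib
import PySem

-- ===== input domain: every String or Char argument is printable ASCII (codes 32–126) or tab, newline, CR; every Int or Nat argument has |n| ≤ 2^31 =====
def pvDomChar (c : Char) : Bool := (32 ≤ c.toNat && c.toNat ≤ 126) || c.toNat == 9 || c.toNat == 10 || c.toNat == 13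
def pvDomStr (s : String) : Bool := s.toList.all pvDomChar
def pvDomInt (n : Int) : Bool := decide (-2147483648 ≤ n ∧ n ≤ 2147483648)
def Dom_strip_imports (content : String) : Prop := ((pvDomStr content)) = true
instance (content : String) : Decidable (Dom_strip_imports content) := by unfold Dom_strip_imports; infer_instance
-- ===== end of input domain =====

-- B is a two-pass decomposition (first mark which lines are inside a multiline string,
-- then filter import lines) of A's one-pass filter; same cost, objective: alternative.

-- ===== PORT A =====
-- one-pass loop: filter while tracking the multiline-string state
-- (state `none` = not inside a multiline string, `some d` = inside one opened by delimiter d;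
--  this combines A's perfectly correlated `in_multiline_string`/`multiline_delimiter` pair)
def pvStripRecA : List String → Option String → List String
  | [], _ => []
  | line :: rest, none =>
      let s := PySem.Str.strip line
      if PySem.Str.startswith s "\"\"\"" || PySem.Str.startswith s "'''" then
        if PySem.Str.count s "\"\"\"" == 1 || PySem.Str.count s "'''" == 1 then
          line :: pvStripRecA rest (some (PySem.Str.slice s none (some 3)))
        else
          line :: pvStripRecA rest none
      else if PySem.Str.startswith s "import " || PySem.Str.startswith s "from " then
        pvStripRecA rest none
      else
        line :: pvStripRecA rest none
  | line :: rest, some d =>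
      let s := PySem.Str.strip line
      if PySem.Str.isIn d s && PySem.Str.count s d % 2 == 1 then
        line :: pvStripRecA rest none
      else
        line :: pvStripRecA rest (some d)

def strip_imports (content : String) : String :=
  PySem.Str.join "\n" (pvStripRecA ((PySem.Str.split? content "\n").getD []) none)

-- ===== PORT B =====
-- pass 1: flag each line with whether it lies inside a multiline string when reached
def pvFlags : List String → Option String → List Bool
  | [], _ => []
  | line :: rest, st =>
      st.isSome ::
        (let s := PySem.Str.strip line
         match st with
         | none =>
             if (PySem.Str.startswith s "\"\"\"" || PySem.Str.startswith s "'''") &&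
                (PySem.Str.count s "\"\"\"" == 1 || PySem.Str.count s "'''" == 1) then
               pvFlags rest (some (PySem.Str.slice s none (some 3)))
             else
               pvFlags rest none
         | some d =>
             if PySem.Str.isIn d s && PySem.Str.count s d % 2 == 1 then
               pvFlags rest none
             else
               pvFlags rest (some d))

-- pass 2 predicate: keep a flagged line unconditionally, else drop import/from lines
def pvKeep (ln : String) (flag : Bool) : Bool :=
  flag || !(PySem.Str.startswith (PySem.Str.strip ln) "import " ||
            PySem.Str.startswith (PySem.Str.strip ln) "from ")

def strip_imports_alt (content : String) : String :=
  let lines := (PySem.Str.split? content "\n").getD []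
  PySem.Str.join "\n"
    (((lines.zip (pvFlags lines none)).filter (fun p => pvKeep p.1 p.2)).map Prod.fst)

-- ===== PRECONDITION & SPEC =====
def Spec_strip_imports (content : String) (out : String) : Prop := out = strip_imports_alt content
instance (content : String) (out : String) : Decidable (Spec_strip_imports content out) := by unfold Spec_strip_imports; infer_instance

-- ===== CLAIM (what is proved, stated in full; the proofs are below) =====
def Claim_equal_strip_imports : Prop := ∀ (content : String), Dom_strip_imports content → Spec_strip_imports content (strip_imports content)

-- ===== LEMMAS AND PROOFS =====

-- a stripped line that starts with a triple quote cannot start with "import " or "from "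
theorem pv_triple_not_import (cs : List Char)
    (h : PySem.Chars.startswith cs ['\"', '\"', '\"'] = true ∨
         PySem.Chars.startswith cs ['\'', '\'', '\''] = true) :
    PySem.Chars.startswith cs ['i', 'm', 'p', 'o', 'r', 't', ' '] = false ∧
    PySem.Chars.startswith cs ['f', 'r', 'o', 'm', ' '] = false := by
  rcases h with h | h <;>
  · rw [PySem.Chars.startswith_iff] at h
    obtain ⟨t, ht⟩ := h
    subst ht
    constructor <;>
    · rw [← Bool.not_eq_true, PySem.Chars.startswith_iff]
      rintro ⟨u, hu⟩
      simp at hu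

theorem pv_rec_eq (lines : List String) : ∀ st,
    pvStripRecA lines st =
      ((lines.zip (pvFlags lines st)).filter (fun p => pvKeep p.1 p.2)).map Prod.fst := by
  induction lines with
  | nil => intro st; simp [pvStripRecA, pvFlags]
  | cons line rest ih =>
    intro st
    cases st with
    | none =>
      by_cases hT : (PySem.Chars.startswith (PySem.Chars.strip line.toList) ['\"', '\"', '\"'] = true ∨
                     PySem.Chars.startswith (PySem.Chars.strip line.toList) ['\'', '\'', '\''] = true)
      · obtain ⟨hI1, hI2⟩ := pv_triple_not_import _ hT
        by_cases hC : (PySem.Chars.count (PySem.Chars.strip line.toList) ['\"', '\"', '\"'] = 1 ∨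
                       PySem.Chars.count (PySem.Chars.strip line.toList) ['\'', '\'', '\''] = 1)
        · simp [pvStripRecA, pvFlags, pvKeep, hT, hC, hI1, hI2, ih]
        · simp [pvStripRecA, pvFlags, pvKeep, hT, hC, hI1, hI2, ih]
      · by_cases hImp : (PySem.Chars.startswith (PySem.Chars.strip line.toList) ['i', 'm', 'p', 'o', 'r', 't', ' '] = true ∨
                         PySem.Chars.startswith (PySem.Chars.strip line.toList) ['f', 'r', 'o', 'm', ' '] = true)
        · rcases hImp with h | h <;> simp [pvStripRecA, pvFlags, pvKeep, hT, h, ih]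
        · simp only [not_or, Bool.not_eq_true] at hImp
          obtain ⟨ha, hb⟩ := hImp
          simp [pvStripRecA, pvFlags, pvKeep, hT, ha, hb, ih]
    | some d =>
      by_cases hE : (PySem.Chars.isIn d.toList (PySem.Chars.strip line.toList) = true ∧
                     PySem.Chars.count (PySem.Chars.strip line.toList) d.toList % 2 = 1)
      · simp [pvStripRecA, pvFlags, pvKeep, hE, ih]
      · simp [pvStripRecA, pvFlags, pvKeep, hE, ih]

-- ===== VERDICT (by name: the statement is the Claim_ definition above) =====
theorem strip_imports_spec : Claim_equal_strip_imports := by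
  intro content _
  unfold Spec_strip_imports strip_imports strip_imports_alt
  rw [pv_rec_eq]
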